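-- pv_equiv track=rewrite | github.com/Yadkee/orphans | logic.py | vertical_moves
-- ===== SOURCE A (Python) =====
-- def vertical_moves(pos):
--     r, c = divmod(pos, 8)
--     up = zip(range(-8, -64, -8), (r > i for i in range(0, 8)))
--     down = zip(range(8, 64, 8), (r < i for i in range(7, 0, -1)))
--     left = zip(range(-1, -8, -1), (c > i for i in range(0, 8)))
--     right = zip(range(1, 8, 1), (c < i for i in range(7, 0, -1)))
--     return [[i for i, cond in d if cond]
--             for d in (up, down, left, right)]
-- ===== SOURCE B (Python) =====
-- def vertical_moves(pos):
--     r, c = divmod(pos, 8)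
--     up = [-8 * j for j in range(1, min(r, 7) + 1)]
--     down = [8 * j for j in range(1, min(7 - r, 7) + 1)]
--     left = [-j for j in range(1, c + 1)]
--     right = [j for j in range(1, 8 - c)]
--     return [up, down, left, right]
-- ===== Notes on version B (the rewrite author's own statement) =====
-- stated objective: simpler
-- what changed: B computes each direction's move count arithmetically from the row/column (clamped to the 7-square board limit) and maps a single range to offsets, instead of zipping fixed offset ranges with boolean-generator conditions and filtering.
import Mathlib
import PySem

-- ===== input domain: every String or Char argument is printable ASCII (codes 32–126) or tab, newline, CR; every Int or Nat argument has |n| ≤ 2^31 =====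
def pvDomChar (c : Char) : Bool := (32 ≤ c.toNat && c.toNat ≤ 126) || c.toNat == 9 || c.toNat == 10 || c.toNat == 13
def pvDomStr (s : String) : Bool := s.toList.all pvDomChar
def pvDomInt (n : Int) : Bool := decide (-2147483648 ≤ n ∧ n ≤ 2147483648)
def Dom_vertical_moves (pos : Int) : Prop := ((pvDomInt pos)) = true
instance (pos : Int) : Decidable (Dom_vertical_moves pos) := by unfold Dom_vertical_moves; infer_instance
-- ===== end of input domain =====

-- B computes each direction’s move count arithmetically from the (clamped) row/column and maps one range per direction, replacing A’s zip-with-boolean-generators-and-filter; objective: simpler.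

-- ===== PORT A =====
-- Literal port of A: divmod, four zips of offset ranges with boolean generators, filtered.
def vertical_moves (pos : Int) : List (List Int) :=
  let r := PySem.Int.floordiv pos 8
  let c := PySem.Int.mod pos 8
  let up := List.zip (PySem.List.pyRange (-8) (-64) (-8)) ((PySem.List.pyRange 0 8 1).map (fun i => decide (r > i)))
  let down := List.zip (PySem.List.pyRange 8 64 8) ((PySem.List.pyRange 7 0 (-1)).map (fun i => decide (r < i)))
  let left := List.zip (PySem.List.pyRange (-1) (-8) (-1)) ((PySem.List.pyRange 0 8 1).map (fun i => decide (c > i)))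
  let right := List.zip (PySem.List.pyRange 1 8 1) ((PySem.List.pyRange 7 0 (-1)).map (fun i => decide (c < i)))
  [up, down, left, right].map (fun d => (d.filter (fun p => p.2)).map (fun p => p.1))

-- ===== PORT B =====
-- Port of B: per-direction move counts computed arithmetically, one range per direction.
def vertical_moves_alt (pos : Int) : List (List Int) :=
  let r := PySem.Int.floordiv pos 8
  let c := PySem.Int.mod pos 8
  let up := (PySem.List.pyRange 1 (min r 7 + 1) 1).map (fun j => -8 * j)
  let down := (PySem.List.pyRange 1 (min (7 - r) 7 + 1) 1).map (fun j => 8 * j)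
  let left := (PySem.List.pyRange 1 (c + 1) 1).map (fun j => -j)
  let right := (PySem.List.pyRange 1 (8 - c) 1).map (fun j => j)
  [up, down, left, right]

-- ===== PRECONDITION & SPEC =====
def Spec_vertical_moves (pos : Int) (out : List (List Int)) : Prop := out = vertical_moves_alt pos
instance (pos : Int) (out : List (List Int)) : Decidable (Spec_vertical_moves pos out) := by unfold Spec_vertical_moves; infer_instance

-- ===== CLAIM (what is proved, stated in full; the proofs are below) =====
def Claim_equal_vertical_moves : Prop := ∀ (pos : Int), Dom_vertical_moves pos → Spec_vertical_moves pos (vertical_moves pos)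

-- ===== LEMMAS AND PROOFS =====

-- concrete range evaluations used by the filter lemmas
lemma pvUpRange : PySem.List.pyRange (-8) (-64) (-8) = [-8,-16,-24,-32,-40,-48,-56] := by decide
lemma pvDownRange : PySem.List.pyRange 8 64 8 = [8,16,24,32,40,48,56] := by decide
lemma pvAsc : PySem.List.pyRange 0 8 1 = [0,1,2,3,4,5,6,7] := by decide
lemma pvDesc : PySem.List.pyRange 7 0 (-1) = [7,6,5,4,3,2,1] := by decide

lemma pvUp (r : Int) :
    ((List.zip (PySem.List.pyRange (-8) (-64) (-8)) ((PySem.List.pyRange 0 8 1).map (fun i => decide (r > i)))).filter (fun p => p.2)).map (fun p => p.1)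
      = (PySem.List.pyRange 1 (min r 7 + 1) 1).map (fun j => -8 * j) := by
  rw [pvUpRange, pvAsc]
  simp only [List.map_cons, List.map_nil]
  rcases (by omega : r ≤ 0 ∨ 0 < r) with h | h
  · rw [show min r 7 = r from by omega, PySem.List.pyRange_one_eq_nil (by omega),
      decide_eq_false (by omega : ¬(r > (0:Int))), decide_eq_false (by omega : ¬(r > (1:Int))),
      decide_eq_false (by omega : ¬(r > (2:Int))), decide_eq_false (by omega : ¬(r > (3:Int))),
      decide_eq_false (by omega : ¬(r > (4:Int))), decide_eq_false (by omega : ¬(r > (5:Int))),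
      decide_eq_false (by omega : ¬(r > (6:Int))), decide_eq_false (by omega : ¬(r > (7:Int)))]
    decide
  rcases (by omega : 7 ≤ r ∨ r < 7) with h7 | h7
  · rw [show min r 7 = 7 from by omega,
      decide_eq_true (by omega : r > (0:Int)), decide_eq_true (by omega : r > (1:Int)),
      decide_eq_true (by omega : r > (2:Int)), decide_eq_true (by omega : r > (3:Int)),
      decide_eq_true (by omega : r > (4:Int)), decide_eq_true (by omega : r > (5:Int)),
      decide_eq_true (by omega : r > (6:Int))]
    rcases (by omega : r = 7 ∨ 7 < r) with h | h
    · subst h; decide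
    · rw [decide_eq_true (by omega : r > (7:Int))]; decide
  · interval_cases r <;> decide

lemma pvDown (r : Int) :
    ((List.zip (PySem.List.pyRange 8 64 8) ((PySem.List.pyRange 7 0 (-1)).map (fun i => decide (r < i)))).filter (fun p => p.2)).map (fun p => p.1)
      = (PySem.List.pyRange 1 (min (7 - r) 7 + 1) 1).map (fun j => 8 * j) := by
  rw [pvDownRange, pvDesc]
  simp only [List.map_cons, List.map_nil]
  rcases (by omega : 7 ≤ r ∨ r < 7) with h | h
  · rw [show min (7 - r) 7 = 7 - r from by omega, PySem.List.pyRange_one_eq_nil (by omega),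
      decide_eq_false (by omega : ¬(r < (7:Int))), decide_eq_false (by omega : ¬(r < (6:Int))),
      decide_eq_false (by omega : ¬(r < (5:Int))), decide_eq_false (by omega : ¬(r < (4:Int))),
      decide_eq_false (by omega : ¬(r < (3:Int))), decide_eq_false (by omega : ¬(r < (2:Int))),
      decide_eq_false (by omega : ¬(r < (1:Int)))]
    decide
  rcases (by omega : r ≤ 0 ∨ 0 < r) with h0 | h0
  · rw [show min (7 - r) 7 = 7 from by omega,
      decide_eq_true (by omega : r < (7:Int)), decide_eq_true (by omega : r < (6:Int)),
      decide_eq_true (by omega : r < (5:Int)), decide_eq_true (by omega : r < (4:Int)),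
      decide_eq_true (by omega : r < (3:Int)), decide_eq_true (by omega : r < (2:Int)),
      decide_eq_true (by omega : r < (1:Int))]
    decide
  · interval_cases r <;> decide

lemma pvLeft (c : Int) (h0 : 0 ≤ c) (h8 : c < 8) :
    ((List.zip (PySem.List.pyRange (-1) (-8) (-1)) ((PySem.List.pyRange 0 8 1).map (fun i => decide (c > i)))).filter (fun p => p.2)).map (fun p => p.1)
      = (PySem.List.pyRange 1 (c + 1) 1).map (fun j => -j) := by
  interval_cases c <;> decide

lemma pvRight (c : Int) (h0 : 0 ≤ c) (h8 : c < 8) :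
    ((List.zip (PySem.List.pyRange 1 8 1) ((PySem.List.pyRange 7 0 (-1)).map (fun i => decide (c < i)))).filter (fun p => p.2)).map (fun p => p.1)
      = (PySem.List.pyRange 1 (8 - c) 1).map (fun j => j) := by
  interval_cases c <;> decide


-- ===== VERDICT (by name: the statement is the Claim_ definition above) =====
theorem vertical_moves_spec : Claim_equal_vertical_moves := by
  intro pos _
  unfold Spec_vertical_moves vertical_moves vertical_moves_alt
  simp only [List.map]
  rw [pvUp, pvDown,
    pvLeft _ (PySem.Int.mod_nonneg pos (by norm_num)) (PySem.Int.mod_lt pos (by norm_num)),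
    pvRight _ (PySem.Int.mod_nonneg pos (by norm_num)) (PySem.Int.mod_lt pos (by norm_num))]
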